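-- pv_equiv track=rewrite | github.com/nathanielyong/csc110 | a4/a4_part4.py | grid_break
-- ===== SOURCE A (Python) =====
-- def grid_break_helper(ciphertext: str, k: int) -> str:
--     """Returns the transposed ciphertext as a string using the key.
--
--     >>> grid_break_helper('DDTMCA EPIVMAUEIACTNDRHEC I REAOC !N OS!', 8)
--     'DAVID AND MARIO TEACH COMPUTER SCIENCE!!'
--     """
--     text = ''
--     length = len(ciphertext)
--     step = length // k
--
--     for i in range(step):
--         for j in range(i, length, step):
--             text += ciphertext[j]
--
--     return text
--
-- def grid_break(ciphertext: str, candidates: set[str]) -> set[int]: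
--     """Return the set of possible secret keys that decrypt the given ciphertext into a message
--     that contains at least one of the candidate words.
--
--     >>> candidate_words = {'DAVID', 'MINE'}
--     >>> grid_break('DDTMCA EPIVMAUEIACTNDRHEC I REAOC !N OS!', candidate_words) == {8, 10}
--     True
--     """
--     result = set()
--     length = len(ciphertext)
--     possible_keys = {num for num in range(1, length + 1) if length % num == 0}
--
--     for k in possible_keys:
--         for word in candidates:
--             text = grid_break_helper(ciphertext, k)
--
--             if word in text:
--                 result.add(k)
--
--     return result
-- ===== SOURCE B (Python) =====
-- def grid_break(ciphertext: str, candidates: set[str]) -> set[int]: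
--     """Alternative: find candidate keys by trial division up to sqrt(n), and
--     decrypt by building the k x step grid explicitly and transposing it with
--     zip, once per key (instead of per key-word pair)."""
--     n = len(ciphertext)
--     divs = set()
--     i = 1
--     while i * i <= n:
--         if n % i == 0:
--             divs.add(i)
--             divs.add(n // i)
--         i += 1
--     result = set()
--     for k in sorted(divs):
--         step = n // k
--         rows = [ciphertext[r * step:(r + 1) * step] for r in range(k)]
--         text = ''.join(''.join(col) for col in zip(*rows))
--         if any(word in text for word in candidates):
--             result.add(k)
--     return result
-- ===== Notes on version B (the rewrite author's own statement) =====
-- stated objective: faster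
-- what changed: B finds candidate keys by trial division up to sqrt(n) (collecting divisor pairs d and n//d) instead of filtering the whole range 1..n, and decrypts by building the k-row grid of string slices and transposing it with zip+join once per key, instead of A's per-(key,word) character-by-character strided walk with quadratic string concatenation.
import Mathlib
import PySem

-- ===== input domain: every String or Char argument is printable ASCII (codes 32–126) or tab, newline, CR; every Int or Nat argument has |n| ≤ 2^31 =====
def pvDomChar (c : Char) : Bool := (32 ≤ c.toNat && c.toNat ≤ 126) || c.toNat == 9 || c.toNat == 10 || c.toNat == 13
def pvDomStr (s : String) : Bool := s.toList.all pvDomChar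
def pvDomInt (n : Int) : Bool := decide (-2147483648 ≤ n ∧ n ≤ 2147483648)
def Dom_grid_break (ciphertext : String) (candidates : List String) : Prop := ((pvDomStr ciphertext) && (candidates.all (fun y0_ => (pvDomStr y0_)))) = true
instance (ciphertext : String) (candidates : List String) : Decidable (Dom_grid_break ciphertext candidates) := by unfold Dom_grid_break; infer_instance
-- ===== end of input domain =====

-- B finds the candidate keys by trial division up to sqrt(len) and decrypts by building the
-- grid of row slices and transposing it with zip, once per key; same return value as A.

-- ===== PORT A =====
def grid_break_helper (ciphertext : String) (k : Int) : List Char :=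
  let length : Int := PySem.Str.len ciphertext
  let step := PySem.Int.floordiv length k
  (PySem.List.pyRange 0 step 1).foldl (fun text i =>
    (PySem.List.pyRange i length step).foldl (fun t j =>
      t ++ [PySem.List.pyGetD ciphertext.toList j ' ']) text) []

def grid_break (ciphertext : String) (candidates : List String) : List Int :=
  let length : Int := PySem.Str.len ciphertext
  let possible_keys : PySem.Set Int :=
    PySem.Set.ofList ((PySem.List.pyRange 1 (length + 1) 1).filter
      (fun num => PySem.Int.mod length num == 0))
  possible_keys.foldl (fun result k =>
    candidates.foldl (fun result word =>
      let text := grid_break_helper ciphertext k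
      if PySem.Chars.isIn word.toList text then PySem.Set.add result k else result) result)
    PySem.Set.empty

-- ===== PORT B =====
-- the 'while i * i <= n' trial-division loop of Source B (1 ≤ i is a loop invariant of Source B,
-- carried in the guard only to establish termination; it never changes the computation)
def pvDivLoop (n i : Int) (divs : PySem.Set Int) : PySem.Set Int :=
  if _h : i * i ≤ n ∧ 1 ≤ i then
    pvDivLoop n (i + 1)
      (if PySem.Int.mod n i == 0 then
        PySem.Set.add (PySem.Set.add divs i) (PySem.Int.floordiv n i) else divs)
  else divs
termination_by (n + 1 - i).toNat
decreasing_by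
  obtain ⟨h1, h2⟩ := _h
  have : i ≤ i * i := le_mul_of_one_le_left (by omega) h2
  omega

-- zip(*rows): columns until the shortest row is exhausted (Python zip semantics)
def pvZipT (rows : List (List Char)) : List (List Char) :=
  if rows.isEmpty || rows.any List.isEmpty then []
  else rows.map (fun r => r.headD ' ') :: pvZipT (rows.map List.tail)
termination_by (rows.headD []).length
decreasing_by
  cases rows with
  | nil => simp at *
  | cons r rs =>
    simp_all
    cases r <;> simp_all

def grid_break_alt (ciphertext : String) (candidates : List String) : List Int :=
  let cs := ciphertext.toList
  let n : Int := PySem.Str.len ciphertext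
  let divs := pvDivLoop n 1 PySem.Set.empty
  (PySem.List.sorted divs (fun x => x)).foldl (fun result k =>
    let step := PySem.Int.floordiv n k
    let rows := (PySem.List.pyRange 0 k 1).map (fun r =>
      PySem.List.slice cs (some (r * step)) (some ((r + 1) * step)))
    let text := (pvZipT rows).flatten
    if candidates.any (fun word => PySem.Chars.isIn word.toList text) then
      PySem.Set.add result k
    else result)
    PySem.Set.empty

-- ===== PRECONDITION & SPEC =====
def Spec_grid_break (ciphertext : String) (candidates : List String) (out : List Int) : Prop := out = grid_break_alt ciphertext candidates
instance (ciphertext : String) (candidates : List String) (out : List Int) : Decidable (Spec_grid_break ciphertext candidates out) := by unfold Spec_grid_break; infer_instance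

-- ===== CLAIM (what is proved, stated in full; the proofs are below) =====
def Claim_equal_grid_break : Prop := ∀ (ciphertext : String) (candidates : List String), Dom_grid_break ciphertext candidates → Spec_grid_break ciphertext candidates (grid_break ciphertext candidates)

-- ===== LEMMAS AND PROOFS =====

theorem pvFoldWords (T : List Char) (k : Int) (ws : List String) (res : PySem.Set Int) :
    ws.foldl (fun r w => if PySem.Chars.isIn w.toList T then PySem.Set.add r k else r) res
      = if ws.any (fun w => PySem.Chars.isIn w.toList T) then PySem.Set.add res k else res := by
  induction ws generalizing res with
  | nil => simp
  | cons w t ih =>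
    simp only [List.foldl_cons, List.any_cons]
    by_cases h : PySem.Chars.isIn w.toList T = true
    · simp [h, ih]
    · simp [h, ih]

theorem pvDivLoop_mem (n : Int) (x : Int) : ∀ (i : Int) (divs : PySem.Set Int), 1 ≤ i →
    (x ∈ pvDivLoop n i divs ↔
      x ∈ divs ∨ ∃ j : Int, i ≤ j ∧ j * j ≤ n ∧ j ∣ n ∧ (x = j ∨ x = n / j)) := by
  intro i divs hi
  induction i, divs using pvDivLoop.induct n with
  | case1 i divs h hrec =>
    rw [pvDivLoop, dif_pos h]
    simp only [dite_eq_ite] at hrec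
    rw [hrec (by omega)]
    have hfd : PySem.Int.floordiv n i = n / i := Int.fdiv_eq_ediv_of_nonneg n (by omega)
    by_cases hd : i ∣ n
    · have hm : (PySem.Int.mod n i == 0) = true := by
        simp [PySem.Int.mod_eq_zero_iff_dvd, hd]
      rw [if_pos hm]
      simp only [PySem.Set.mem_add, hfd]
      constructor
      · rintro (((hx | rfl) | rfl) | ⟨j, hj1, hj2, hj3, hj4⟩)
        · exact Or.inl hx
        · exact Or.inr ⟨x, by omega, h.1, hd, Or.inl rfl⟩
        · exact Or.inr ⟨i, by omega, h.1, hd, Or.inr rfl⟩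
        · exact Or.inr ⟨j, by omega, hj2, hj3, hj4⟩
      · rintro (hx | ⟨j, hj1, hj2, hj3, hj4⟩)
        · exact Or.inl (Or.inl (Or.inl hx))
        · rcases eq_or_lt_of_le hj1 with rfl | hlt
          · rcases hj4 with rfl | rfl
            · exact Or.inl (Or.inl (Or.inr rfl))
            · exact Or.inl (Or.inr rfl)
          · exact Or.inr ⟨j, by omega, hj2, hj3, hj4⟩
    · have hm : (PySem.Int.mod n i == 0) = false := by
        simp [PySem.Int.mod_eq_zero_iff_dvd, hd]
      rw [if_neg (by simp [hm])]
      constructor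
      · rintro (hx | ⟨j, hj1, hj2, hj3, hj4⟩)
        · exact Or.inl hx
        · exact Or.inr ⟨j, by omega, hj2, hj3, hj4⟩
      · rintro (hx | ⟨j, hj1, hj2, hj3, hj4⟩)
        · exact Or.inl hx
        · rcases eq_or_lt_of_le hj1 with rfl | hlt
          · exact absurd hj3 hd
          · exact Or.inr ⟨j, by omega, hj2, hj3, hj4⟩
  | case2 i divs h =>
    rw [pvDivLoop, dif_neg h]
    have hii : ¬ i * i ≤ n := fun hc => h ⟨hc, hi⟩
    constructor
    · exact Or.inl
    · rintro (hx | ⟨j, hj1, hj2, hj3, hj4⟩)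
      · exact hx
      · exfalso
        have : i * i ≤ j * j := mul_le_mul hj1 hj1 (by omega) (by omega)
        omega

theorem pvDivLoop_nodup (n : Int) : ∀ (i : Int) (divs : PySem.Set Int), divs.Nodup →
    (pvDivLoop n i divs).Nodup := by
  intro i divs h
  induction i, divs using pvDivLoop.induct n with
  | case1 i divs hg hrec =>
    rw [pvDivLoop, dif_pos hg]
    simp only [dite_eq_ite] at hrec
    apply hrec
    split
    · exact PySem.Set.nodup_add _ _ (PySem.Set.nodup_add _ _ h)
    · exact h
  | case2 i divs hg =>
    rw [pvDivLoop, dif_neg hg]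
    exact h

theorem pvMem_divs (n : Int) (hn : 0 ≤ n) (x : Int) :
    x ∈ pvDivLoop n 1 PySem.Set.empty ↔ 1 ≤ x ∧ x ≤ n ∧ x ∣ n := by
  rw [pvDivLoop_mem n x 1 PySem.Set.empty (by omega)]
  simp only [PySem.Set.empty, List.not_mem_nil, false_or]
  constructor
  · rintro ⟨j, hj1, hj2, hj3, rfl | rfl⟩
    · exact ⟨hj1, by nlinarith, hj3⟩
    · have hj0 : 0 < j := by omega
      have hjn : j ≤ n := by nlinarith
      refine ⟨?_, Int.ediv_le_self j hn, Int.ediv_dvd_of_dvd hj3⟩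
      rw [Int.le_ediv_iff_mul_le hj0]
      omega
  · rintro ⟨hx1, hx2, hx3⟩
    by_cases hxx : x * x ≤ n
    · exact ⟨x, hx1, hxx, hx3, Or.inl rfl⟩
    · obtain ⟨m, rfl⟩ := hx3
      have hx0 : 0 < x := by omega
      have hm1 : 1 ≤ m := by nlinarith
      have hmx : m < x := by nlinarith
      have hdm : x * m / x = m := Int.mul_ediv_cancel_left m (by omega)
      refine ⟨x * m / x, ?_, ?_, Int.ediv_dvd_of_dvd ⟨m, rfl⟩, Or.inr ?_⟩
      · omega
      · rw [hdm]; nlinarith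
      · rw [hdm, mul_comm, Int.mul_ediv_cancel_left x (by omega)]

theorem pvKeys_eq (n : Int) (hn : 0 ≤ n) :
    PySem.List.sorted (pvDivLoop n 1 PySem.Set.empty) (fun x => x)
      = (PySem.List.pyRange 1 (n + 1) 1).filter (fun num => PySem.Int.mod n num == 0) := by
  apply PySem.List.sorted_eq_of_perm_of_pairwise_lt
  · rw [List.perm_ext_iff_of_nodup
      ((PySem.List.nodup_pyRange_one 1 (n+1)).filter _)
      (pvDivLoop_nodup n 1 PySem.Set.empty List.nodup_nil)]
    intro a
    rw [List.mem_filter, PySem.List.mem_pyRange_one, pvMem_divs n hn a]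
    rw [show ((PySem.Int.mod n a == 0) = true) ↔ a ∣ n by simp [PySem.Int.mod_eq_zero_iff_dvd]]
    omega
  · exact (PySem.List.pairwise_lt_pyRange_one 1 (n+1)).filter _

theorem pvZipT_spec (st : Nat) : ∀ (rows : List (List Char)), rows ≠ [] →
    (∀ r ∈ rows, r.length = st) →
    pvZipT rows = (List.range st).map (fun i => rows.map (fun r => r.getD i ' ')) := by
  induction st with
  | zero =>
    intro rows hne hlen
    rw [pvZipT]
    have : rows.any List.isEmpty = true := by
      cases rows with
      | nil => simp at hne
      | cons r rs => simp [List.length_eq_zero_iff.mp (hlen r (by simp))]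
    simp [this]
  | succ s ih =>
    intro rows hne hlen
    rw [pvZipT]
    have hno : rows.any List.isEmpty = false := by
      simp only [List.any_eq_false]
      intro r hr
      simp [List.isEmpty_iff]
      intro h; subst h; have := hlen [] hr; simp at this
    have hie : rows.isEmpty = false := by simpa [List.isEmpty_iff] using hne
    simp only [hno, hie, Bool.or_false, if_neg Bool.false_ne_true]
    rw [ih (rows.map List.tail)
      (by simpa using hne)
      (by intro r hr; simp at hr; obtain ⟨a, ha, rfl⟩ := hr
          have := hlen a ha; simp [List.length_tail, this])]
    rw [List.range_succ_eq_map]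
    simp only [List.map_cons, List.map_map]
    apply congrArg₂ (· :: ·)
    · apply List.map_congr_left
      intro r hr
      have : r.length = s + 1 := hlen r hr
      cases r with
      | nil => simp at this
      | cons a t => simp
    · apply List.map_congr_left
      intro i _
      simp only [Function.comp]
      apply List.map_congr_left
      intro r hr
      have : r.length = s + 1 := hlen r hr
      cases r with
      | nil => simp at this
      | cons a t => simp [Nat.succ_eq_add_one]

theorem pvA_side (L : List Char) (K st : Nat) (hK : 1 ≤ K) (hst : 1 ≤ st) (hN : L.length = K * st) :
    (PySem.List.pyRange 0 (st:Int) 1).flatMap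
      (fun i => (PySem.List.pyRange i (L.length:Int) (st:Int)).map (fun j => PySem.List.pyGetD L j ' '))
    = (List.range st).flatMap (fun ii => (List.range K).map (fun q => L.getD (q*st+ii) ' ')) := by
  rw [PySem.List.pyRange_zero_natCast st, List.flatMap_map]
  rw [List.flatMap_def, List.flatMap_def]
  congr 1
  apply List.map_congr_left
  intro ii hii
  rw [List.mem_range] at hii
  rw [PySem.List.pyRange_of_pos _ _ (by exact_mod_cast hst)]
  have hlt : (ii:Int) < (L.length:Int) := by
    have : ii < L.length := by rw [hN]; nlinarith
    exact_mod_cast this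
  rw [if_pos hlt]
  have hcnt : (((L.length:Int) - ii + st - 1) / st).toNat = K := by
    have he : ((L.length:Int) - ii + st - 1) = ((st:Int) - 1 - ii) + K * st := by
      push_cast [hN]; ring
    rw [he, Int.add_mul_ediv_right _ _ (by omega : (st:Int) ≠ 0)]
    rw [Int.ediv_eq_zero_of_lt (by omega) (by omega)]
    omega
  rw [hcnt, List.map_map]
  apply List.map_congr_left
  intro q hq
  rw [List.mem_range] at hq
  simp only [Function.comp]
  rw [show (ii:Int) + (st:Int) * (q:Int) = ((q*st+ii : Nat) : Int) by push_cast; ring]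
  rw [PySem.List.pyGetD_natCast]

theorem pvB_side (L : List Char) (K st : Nat) (hK : 1 ≤ K) (hst : 1 ≤ st) (hN : L.length = K * st) :
    (pvZipT ((PySem.List.pyRange 0 (K:Int) 1).map (fun r =>
        PySem.List.slice L (some (r * (st:Int))) (some ((r + 1) * (st:Int)))))).flatten
    = (List.range st).flatMap (fun ii => (List.range K).map (fun q => L.getD (q*st+ii) ' ')) := by
  rw [PySem.List.pyRange_zero_natCast K, List.map_map]
  have hrows : (List.range K).map ((fun r =>
        PySem.List.slice L (some (r * (st:Int))) (some ((r + 1) * (st:Int)))) ∘ (fun q : Nat => (q:Int)))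
      = (List.range K).map (fun q => (L.drop (q*st)).take st) := by
    apply List.map_congr_left
    intro q hq
    simp only [Function.comp]
    rw [show (q:Int) * (st:Int) = ((q*st : Nat) : Int) by push_cast; ring,
        show ((q:Int) + 1) * (st:Int) = ((q*st + st : Nat) : Int) by push_cast; ring,
        PySem.List.slice_natCast]
    congr 1
    omega
  rw [hrows]
  rw [pvZipT_spec st _ (by simp; omega) ?hlen]
  case hlen =>
    intro r hr
    simp only [List.mem_map, List.mem_range] at hr
    obtain ⟨q, hq, rfl⟩ := hr
    rw [List.length_take, List.length_drop, hN]
    have : q * st + st ≤ K * st := by nlinarith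
    omega
  rw [List.flatMap_def]
  congr 1
  apply List.map_congr_left
  intro ii hii
  rw [List.mem_range] at hii
  rw [List.map_map]
  apply List.map_congr_left
  intro q hq
  rw [List.mem_range] at hq
  simp only [Function.comp]
  rw [List.getD_eq_getElem?_getD, List.getElem?_take, if_pos hii, List.getElem?_drop,
      ← List.getD_eq_getElem?_getD]

theorem pvText_eq (s : String) (k : Int) (h1 : 1 ≤ k) (h2 : k ≤ PySem.Str.len s)
    (h3 : k ∣ PySem.Str.len s) :
    grid_break_helper s k
      = (pvZipT ((PySem.List.pyRange 0 k 1).map (fun r =>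
          PySem.List.slice s.toList (some (r * PySem.Int.floordiv (PySem.Str.len s) k))
            (some ((r + 1) * PySem.Int.floordiv (PySem.Str.len s) k))))).flatten := by
  have hlen := PySem.Str.len_eq s
  set L := s.toList with hLdef
  obtain ⟨K, rfl⟩ : ∃ K : Nat, k = (K:Int) := ⟨k.toNat, (Int.toNat_of_nonneg (by omega)).symm⟩
  have hK : 1 ≤ K := by exact_mod_cast h1
  have hdvd : K ∣ L.length := by rw [hlen] at h3; exact_mod_cast h3
  set st := L.length / K with hstdef
  have hN : L.length = K * st := (Nat.mul_div_cancel' hdvd).symm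
  have hKN : K ≤ L.length := by rw [hlen] at h2; exact_mod_cast h2
  have hst : 1 ≤ st := (Nat.one_le_div_iff (by omega)).mpr hKN
  have hstep : PySem.Int.floordiv (PySem.Str.len s) (K:Int) = (st:Int) := by
    rw [hlen]
    show ((L.length : Int)).fdiv (K:Int) = (st:Int)
    rw [Int.fdiv_eq_ediv_of_nonneg _ (by positivity), ← Int.natCast_div]
  rw [hlen] at hstep
  simp only [grid_break_helper, hlen, hstep, ← hLdef]
  simp only [PySem.List.foldl_append_singleton_eq_map, PySem.List.foldl_append_eq_flatMap,
    List.nil_append]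
  rw [pvA_side L K st hK hst hN, pvB_side L K st hK hst hN]

-- ===== VERDICT (by name: the statement is the Claim_ definition above) =====
theorem grid_break_spec : Claim_equal_grid_break := by
  intro ciphertext candidates _
  unfold Spec_grid_break grid_break grid_break_alt
  simp only []
  have hn0 : 0 ≤ PySem.Str.len ciphertext := by
    rw [PySem.Str.len_eq]; positivity
  rw [pvKeys_eq _ hn0]
  rw [PySem.Set.ofList_eq_self_of_nodup _
    ((PySem.List.nodup_pyRange_one _ _).filter _)]
  apply PySem.List.foldl_congr_mem
  intro acc k hk
  rw [List.mem_filter, PySem.List.mem_pyRange_one] at hk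
  obtain ⟨⟨hk1, hk2⟩, hkd⟩ := hk
  have hkdvd : k ∣ PySem.Str.len ciphertext := by
    rw [← PySem.Int.mod_eq_zero_iff_dvd]
    simpa using hkd
  rw [pvFoldWords, pvText_eq ciphertext k hk1 (by omega) hkdvd]
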